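-- pv_equiv track=rewrite | github.com/kiraskywing/Code_Practice | Dynamic Programming/Medium/LNT_no631_Maximal Square II.py | max_square2
-- ===== SOURCE A (Python) =====
-- from typing import (
--     List,
-- )
--
-- def max_square2(matrix: List[List[int]]) -> int:
--     if not matrix or not matrix[0]:
--         return 0
--
--     m, n = len(matrix), len(matrix[0])
--     left_zeros = [[0] * n for _ in range(m)]
--     up_zeros = [[0] * n for _ in range(m)]
--     dp = [[0] * n for _ in range(m)]
--
--     length = 0
--     for i in range(m):
--         for j in range(n):
--             if matrix[i][j] == 0:
--                 dp[i][j] = 0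
--                 left_zeros[i][j] = 1 if j == 0 else left_zeros[i][j - 1] + 1
--                 up_zeros[i][j] = 1 if i == 0 else up_zeros[i - 1][j] + 1
--             else:
--                 if i == 0 or j == 0:
--                     dp[i][j] = 1
--                 else:
--                     dp[i][j] = min(dp[i - 1][j - 1], left_zeros[i][j - 1], up_zeros[i - 1][j]) + 1
--                 left_zeros[i][j] = up_zeros[i][j] = 0
--                 length = max(length, dp[i][j])
--
--     return length ** 2
-- ===== SOURCE B (Python) =====
-- from typing import (
--     List,
-- )
--
-- def max_square2(matrix: List[List[int]]) -> int:
--     # Grow, for every bottom-right cell, the largest square whose main diagonal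
--     # is nonzero and whose other cells are zero, checking the geometry directly.
--     if not matrix or not matrix[0]:
--         return 0
--     m, n = len(matrix), len(matrix[0])
--
--     def can_extend(i, j, k):
--         # extend a valid square with bottom-right corner (i, j) from side k to k + 1
--         if k > i or k > j:
--             return False
--         if matrix[i - k][j - k] == 0:
--             return False
--         for t in range(k):
--             if matrix[i - k][j - t] != 0 or matrix[i - t][j - k] != 0:
--                 return False
--         return True
--
--     best = 0
--     for i in range(m):
--         for j in range(n):
--             k = 0
--             while can_extend(i, j, k):
--                 k += 1
--             if k > best:
--                 best = k
--     return best ** 2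
-- ===== Notes on version B (the rewrite author's own statement) =====
-- stated objective: alternative
-- what changed: A runs a run-length + min-of-three dynamic program over left_zeros/up_zeros/dp tables; B drops the DP entirely and, for each bottom-right cell, grows the square geometrically, directly checking that each new border row/column is zero and the new diagonal cell nonzero.
import Mathlib
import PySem

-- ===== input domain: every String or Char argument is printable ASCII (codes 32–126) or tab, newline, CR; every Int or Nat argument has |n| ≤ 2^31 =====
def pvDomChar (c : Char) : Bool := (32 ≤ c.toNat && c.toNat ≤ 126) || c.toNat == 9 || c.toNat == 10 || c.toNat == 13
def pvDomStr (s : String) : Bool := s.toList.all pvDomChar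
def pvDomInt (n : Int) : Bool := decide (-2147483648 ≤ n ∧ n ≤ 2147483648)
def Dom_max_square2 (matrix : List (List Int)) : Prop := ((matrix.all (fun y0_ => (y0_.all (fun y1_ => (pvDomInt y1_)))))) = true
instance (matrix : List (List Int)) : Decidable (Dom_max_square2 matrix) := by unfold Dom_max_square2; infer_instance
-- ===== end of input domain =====

-- A runs a run-length + min-of-three DP; B instead grows, for every bottom-right cell, the
-- largest square with nonzero diagonal and zero off-diagonal by direct geometric checking
-- (objective: alternative, not faster).

-- ===== PORT A =====
-- A's inner loop over one row (j = 0,1,…): builds this row of left_zeros / up_zeros / dp and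
-- updates length.  prevLeft = left_zeros[i][j-1], dpDiag = dp[i-1][j-1]; pu/pd are the previous
-- row of up_zeros / dp, consumed in step with j (A's tables are only ever read at the previous
-- row / previous cell, so carrying those rows is A's index accesses made structural).
def innerA (first firstCol : Bool) (prevLeft dpDiag len : Int)
    (row pu pd : List Int) : List Int × List Int × List Int × Int :=
  match row with
  | [] => ([], [], [], len)
  | x :: xs =>
    if x = 0 then
      let lv := if firstCol then 1 else prevLeft + 1
      let uv := if first then 1 else pu.headD 0 + 1
      let r := innerA first false lv (pd.headD 0) len xs pu.tail pd.tail
      (lv :: r.1, uv :: r.2.1, (0:Int) :: r.2.2.1, r.2.2.2)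
    else
      let dv := if first || firstCol then (1:Int)
                else min (min dpDiag prevLeft) (pu.headD 0) + 1
      let len' := max len dv
      let r := innerA first false 0 (pd.headD 0) len' xs pu.tail pd.tail
      ((0:Int) :: r.1, (0:Int) :: r.2.1, dv :: r.2.2.1, r.2.2.2)

-- A's outer loop over i: threads the previous up_zeros row and dp row and the running length.
def outerA (first : Bool) (pu pd : List Int) (len : Int) (rows : List (List Int)) : Int :=
  match rows with
  | [] => len
  | r :: rs =>
    let t := innerA first true 0 0 len r pu pd
    outerA false t.2.1 t.2.2.1 t.2.2.2 rs

-- A reads matrix[i][j] for j < n = len(matrix[0]) only, i.e. row.take n of each row.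
def max_square2 (matrix : List (List Int)) : Int :=
  match matrix with
  | [] => 0
  | r0 :: _ =>
    if r0.length = 0 then 0
    else outerA true [] [] 0 (matrix.map (fun row => row.take r0.length)) ^ 2

-- ===== PORT B =====
-- Source B's can_extend(i, j, k): may a valid square with bottom-right (i, j) grow from side k to
-- k+1?  Python's in-range indexing matrix[a][b] is ported as getD (Pre_ keeps it in range).
def canExt (matrix : List (List Int)) (i j k : Nat) : Bool :=
  if k > i || k > j then false
  else if (matrix.getD (i - k) []).getD (j - k) 0 == 0 then false
  else (List.range k).all fun t =>
    ((matrix.getD (i - k) []).getD (j - t) 0 == 0)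
      && ((matrix.getD (i - t) []).getD (j - k) 0 == 0)

-- termination of the while loop: can_extend forces k ≤ i
lemma canExt_le_left {matrix : List (List Int)} {i j k : Nat}
    (h : canExt matrix i j k = true) : k ≤ i := by
  unfold canExt at h
  by_cases hk : k > i
  · simp [hk] at h
  · omega

-- Source B's while loop: k += 1 while can_extend
def grow (matrix : List (List Int)) (i j k : Nat) : Nat :=
  if h : canExt matrix i j k = true then grow matrix i j (k + 1) else k
termination_by i + 1 - k
decreasing_by
  have := canExt_le_left h
  omega

def max_square2_alt (matrix : List (List Int)) : Int :=
  match matrix with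
  | [] => 0
  | r0 :: _ =>
    if r0.length = 0 then 0
    else
      let m := matrix.length
      let n := r0.length
      let best := (List.range m).foldl (fun b i =>
        (List.range n).foldl (fun b j =>
          let k := grow matrix i j 0
          if k > b then k else b) b) 0
      (best : Int) ^ 2

-- ===== PRECONDITION & SPEC =====
-- Pre_ excludes ragged matrices in which some row is shorter than the first row: there both
-- Pythons raise IndexError (A reads matrix[i][j] for every j < len(matrix[0]); B reads every
-- matrix[i][j] too, via can_extend(i, j, 0)).
def Pre_max_square2 (matrix : List (List Int)) : Prop :=
  ∀ row ∈ matrix, (matrix.headD []).length ≤ row.length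
instance (matrix : List (List Int)) : Decidable (Pre_max_square2 matrix) := by
  unfold Pre_max_square2; infer_instance

def pvWitness_max_square2 : List (List Int) := [[1, 0], [1, 1]]

def Spec_max_square2 (matrix : List (List Int)) (out : Int) : Prop := out = max_square2_alt matrix
instance (matrix : List (List Int)) (out : Int) : Decidable (Spec_max_square2 matrix out) := by unfold Spec_max_square2; infer_instance

-- ===== CLAIM (what is proved, stated in full; the proofs are below) =====
def Claim_equal_max_square2 : Prop := ∀ (matrix : List (List Int)), Dom_max_square2 matrix → Pre_max_square2 matrix → Spec_max_square2 matrix (max_square2 matrix)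

-- ===== LEMMAS AND PROOFS =====

-- cell (i, j) of the matrix (0 when out of range; Pre_ keeps all used accesses in range)
def gV (matrix : List (List Int)) (i j : Nat) : Int := (matrix.getD i []).getD j 0

-- the three DP tables of A, as index functions
def Lf (g : Nat → Nat → Int) (i : Nat) : Nat → Nat
  | 0 => if g i 0 = 0 then 1 else 0
  | j + 1 => if g i (j + 1) = 0 then Lf g i j + 1 else 0

def Uf (g : Nat → Nat → Int) : Nat → Nat → Nat
  | 0, j => if g 0 j = 0 then 1 else 0
  | i + 1, j => if g (i + 1) j = 0 then Uf g i j + 1 else 0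

def Df (g : Nat → Nat → Int) : Nat → Nat → Nat
  | 0, j => if g 0 j = 0 then 0 else 1
  | i + 1, 0 => if g (i + 1) 0 = 0 then 0 else 1
  | i + 1, j + 1 => if g (i + 1) (j + 1) = 0 then 0
      else min (min (Df g i j) (Lf g (i + 1) j)) (Uf g i (j + 1)) + 1

-- the geometric condition B checks when extending a square with bottom-right (i,j) to side t+1
def SqExt (g : Nat → Nat → Int) (i j t : Nat) : Prop :=
  g (i - t) (j - t) ≠ 0 ∧ ∀ b < t, g (i - t) (j - b) = 0 ∧ g (i - b) (j - t) = 0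

lemma Lf_char (g : Nat → Nat → Int) (i : Nat) :
    ∀ j k, k ≤ Lf g i j ↔ (k ≤ j + 1 ∧ ∀ t < k, g i (j - t) = 0) := by
  intro j
  induction j with
  | zero =>
    intro k
    by_cases h : g i 0 = 0
    · simp only [Lf, if_pos h]
      constructor
      · intro hk
        refine ⟨hk, ?_⟩
        intro t ht
        have : t = 0 := by omega
        subst this; simpa using h
      · intro ⟨hk, _⟩; exact hk
    · simp only [Lf, if_neg h]
      constructor
      · intro hk; exact ⟨by omega, by intro t ht; omega⟩
      · intro ⟨hk, hall⟩
        by_contra hc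
        have hk1 : 1 ≤ k := by omega
        have := hall 0 (by omega)
        simp at this
        exact h this
  | succ j ih =>
    intro k
    by_cases h : g i (j+1) = 0
    · simp only [Lf, if_pos h]
      constructor
      · intro hk
        cases k with
        | zero => exact ⟨by omega, by intro t ht; omega⟩
        | succ k' =>
          have hk' : k' ≤ Lf g i j := by omega
          obtain ⟨h1, h2⟩ := (ih k').mp hk'
          refine ⟨by omega, ?_⟩
          intro t ht
          cases t with
          | zero => simpa using h
          | succ t' =>
            have : (j + 1) - (t' + 1) = j - t' := by omega
            rw [this]
            exact h2 t' (by omega)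
      · intro ⟨hk, hall⟩
        cases k with
        | zero => omega
        | succ k' =>
          have : k' ≤ Lf g i j := by
            apply (ih k').mpr
            refine ⟨by omega, ?_⟩
            intro t ht
            have := hall (t+1) (by omega)
            have he : (j + 1) - (t + 1) = j - t := by omega
            rwa [he] at this
          omega
    · simp only [Lf, if_neg h]
      constructor
      · intro hk; exact ⟨by omega, by intro t ht; omega⟩
      · intro ⟨hk, hall⟩
        by_contra hc
        have := hall 0 (by omega)
        simp at this
        exact h this
lemma Uf_char (g : Nat → Nat → Int) :
    ∀ i j k, k ≤ Uf g i j ↔ (k ≤ i + 1 ∧ ∀ t < k, g (i - t) j = 0) := by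
  intro i
  induction i with
  | zero =>
    intro j k
    by_cases h : g 0 j = 0
    · simp only [Uf, if_pos h]
      constructor
      · intro hk
        refine ⟨hk, ?_⟩
        intro t ht
        have : t = 0 := by omega
        subst this; simpa using h
      · intro ⟨hk, _⟩; exact hk
    · simp only [Uf, if_neg h]
      constructor
      · intro hk; exact ⟨by omega, by intro t ht; omega⟩
      · intro ⟨hk, hall⟩
        by_contra hc
        have := hall 0 (by omega)
        simp at this
        exact h this
  | succ i ih =>
    intro j k
    by_cases h : g (i+1) j = 0
    · simp only [Uf, if_pos h]
      constructor
      · intro hk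
        cases k with
        | zero => exact ⟨by omega, by intro t ht; omega⟩
        | succ k' =>
          have hk' : k' ≤ Uf g i j := by omega
          obtain ⟨h1, h2⟩ := (ih j k').mp hk'
          refine ⟨by omega, ?_⟩
          intro t ht
          cases t with
          | zero => simpa using h
          | succ t' =>
            have : (i + 1) - (t' + 1) = i - t' := by omega
            rw [this]
            exact h2 t' (by omega)
      · intro ⟨hk, hall⟩
        cases k with
        | zero => omega
        | succ k' =>
          have : k' ≤ Uf g i j := by
            apply (ih j k').mpr
            refine ⟨by omega, ?_⟩
            intro t ht
            have := hall (t+1) (by omega)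
            have he : (i + 1) - (t + 1) = i - t := by omega
            rwa [he] at this
          omega
    · simp only [Uf, if_neg h]
      constructor
      · intro hk; exact ⟨by omega, by intro t ht; omega⟩
      · intro ⟨hk, hall⟩
        by_contra hc
        have := hall 0 (by omega)
        simp at this
        exact h this
lemma sqExt_zero (g : Nat → Nat → Int) (a b : Nat) : SqExt g a b 0 ↔ g a b ≠ 0 := by
  simp [SqExt]

lemma sqExt_succ (g : Nat → Nat → Int) (i j t : Nat) :
    SqExt g (i+1) (j+1) (t+1)
      ↔ SqExt g i j t ∧ g (i+1) (j - t) = 0 ∧ g (i - t) (j+1) = 0 := by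
  unfold SqExt
  have e1 : (i + 1) - (t + 1) = i - t := by omega
  have e2 : (j + 1) - (t + 1) = j - t := by omega
  rw [e1, e2]
  constructor
  · intro ⟨hd, hb⟩
    have h0 := hb 0 (by omega)
    simp only [Nat.sub_zero] at h0
    refine ⟨⟨hd, ?_⟩, h0.2, h0.1⟩
    intro b hbt
    have := hb (b+1) (by omega)
    have e3 : (j + 1) - (b + 1) = j - b := by omega
    have e4 : (i + 1) - (b + 1) = i - b := by omega
    rwa [e3, e4] at this
  · intro ⟨⟨hd, hin⟩, hr, hc⟩
    refine ⟨hd, ?_⟩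
    intro b hbt
    cases b with
    | zero => simpa using ⟨hc, hr⟩
    | succ b' =>
      have e3 : (j + 1) - (b' + 1) = j - b' := by omega
      have e4 : (i + 1) - (b' + 1) = i - b' := by omega
      rw [e3, e4]
      exact hin b' (by omega)

lemma Df_char (g : Nat → Nat → Int) :
    ∀ i j k, k ≤ Df g i j ↔ (k ≤ i + 1 ∧ k ≤ j + 1 ∧ ∀ t < k, SqExt g i j t) := by
  intro i
  induction i with
  | zero =>
    intro j k
    by_cases h : g 0 j = 0
    · simp only [Df, if_pos h]
      constructor
      · intro hk; exact ⟨by omega, by omega, by intro t ht; omega⟩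
      · intro ⟨_, _, hall⟩
        by_contra hc
        exact ((sqExt_zero g 0 j).mp (hall 0 (by omega))) h
    · simp only [Df, if_neg h]
      constructor
      · intro hk
        refine ⟨hk, by omega, ?_⟩
        intro t ht
        have : t = 0 := by omega
        subst this
        exact (sqExt_zero g 0 j).mpr h
      · intro ⟨hk, _, _⟩; exact hk
  | succ i ih =>
    intro j k
    cases j with
    | zero =>
      by_cases h : g (i+1) 0 = 0
      · simp only [Df, if_pos h]
        constructor
        · intro hk; exact ⟨by omega, by omega, by intro t ht; omega⟩
        · intro ⟨_, _, hall⟩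
          by_contra hc
          exact ((sqExt_zero g (i+1) 0).mp (hall 0 (by omega))) h
      · simp only [Df, if_neg h]
        constructor
        · intro hk
          refine ⟨by omega, hk, ?_⟩
          intro t ht
          have : t = 0 := by omega
          subst this
          exact (sqExt_zero g (i+1) 0).mpr h
        · intro ⟨_, hk, _⟩; exact hk
    | succ j =>
      by_cases h : g (i+1) (j+1) = 0
      · simp only [Df, if_pos h]
        constructor
        · intro hk; exact ⟨by omega, by omega, by intro t ht; omega⟩
        · intro ⟨_, _, hall⟩
          by_contra hc
          exact ((sqExt_zero g (i+1) (j+1)).mp (hall 0 (by omega))) h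
      · simp only [Df, if_neg h]
        cases k with
        | zero =>
          constructor
          · intro _
            exact ⟨by omega, by omega, by intro t ht; omega⟩
          · intro _
            omega
        | succ k' =>
          have hsplit : (k' + 1 ≤ min (min (Df g i j) (Lf g (i+1) j)) (Uf g i (j+1)) + 1)
              ↔ (k' ≤ Df g i j ∧ k' ≤ Lf g (i+1) j ∧ k' ≤ Uf g i (j+1)) := by omega
          rw [hsplit, ih j k', Lf_char, Uf_char]
          constructor
          · intro ⟨⟨hi, hj, hext⟩, ⟨_, hL⟩, ⟨_, hU⟩⟩
            refine ⟨by omega, by omega, ?_⟩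
            intro t ht
            cases t with
            | zero => exact (sqExt_zero g (i+1) (j+1)).mpr h
            | succ t' =>
              exact (sqExt_succ g i j t').mpr
                ⟨hext t' (by omega), hL t' (by omega), hU t' (by omega)⟩
          · intro ⟨hi, hj, hext⟩
            refine ⟨⟨by omega, by omega, ?_⟩, ⟨by omega, ?_⟩, ⟨by omega, ?_⟩⟩
            · intro t ht
              exact ((sqExt_succ g i j t).mp (hext (t+1) (by omega))).1
            · intro t ht
              exact ((sqExt_succ g i j t).mp (hext (t+1) (by omega))).2.1
            · intro t ht
              exact ((sqExt_succ g i j t).mp (hext (t+1) (by omega))).2.2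
lemma canExt_iff (matrix : List (List Int)) (i j k : Nat) :
    canExt matrix i j k = true ↔ k ≤ i ∧ k ≤ j ∧ SqExt (gV matrix) i j k := by
  unfold canExt SqExt gV
  split_ifs with h1 h2
  · simp only [Bool.or_eq_true, decide_eq_true_eq] at h1
    constructor
    · intro h; simp at h
    · intro ⟨ha, hb, _⟩; omega
  · simp only [Bool.or_eq_true, decide_eq_true_eq] at h1
    simp only [beq_iff_eq] at h2
    constructor
    · intro h; simp at h
    · intro ⟨_, _, hd, _⟩; exact absurd h2 hd
  · simp only [Bool.or_eq_true, decide_eq_true_eq] at h1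
    simp only [beq_iff_eq] at h2
    simp only [List.all_eq_true, List.mem_range, Bool.and_eq_true, beq_iff_eq]
    constructor
    · intro h
      exact ⟨by omega, by omega, h2, fun b hb => h b hb⟩
    · intro ⟨_, _, _, hall⟩
      exact fun t ht => hall t ht

lemma Df_le_left (g : Nat → Nat → Int) (i j : Nat) : Df g i j ≤ i + 1 :=
  ((Df_char g i j (Df g i j)).mp le_rfl).1

lemma grow_eq_aux (matrix : List (List Int)) (i j : Nat) :
    ∀ d k, i + 1 - k ≤ d → k ≤ Df (gV matrix) i j → grow matrix i j k = Df (gV matrix) i j := by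
  intro d
  induction d with
  | zero =>
    intro k hd hk
    have hle := Df_le_left (gV matrix) i j
    have hfalse : ¬ (canExt matrix i j k = true) := by
      rw [canExt_iff]
      intro ⟨ha, _, _⟩
      omega
    rw [grow, dif_neg hfalse]
    omega
  | succ d ih =>
    intro k hd hk
    by_cases hc : canExt matrix i j k = true
    · obtain ⟨hi, hj, he⟩ := (canExt_iff matrix i j k).mp hc
      obtain ⟨_, _, hall⟩ := (Df_char (gV matrix) i j k).mp hk
      have hk1 : k + 1 ≤ Df (gV matrix) i j := by
        rw [Df_char]
        refine ⟨by omega, by omega, ?_⟩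
        intro t ht
        by_cases htk : t < k
        · exact hall t htk
        · have : t = k := by omega
          subst this; exact he
      rw [grow, dif_pos hc]
      exact ih (k+1) (by omega) hk1
    · have hup : ¬ (k + 1 ≤ Df (gV matrix) i j) := by
        intro hk1
        obtain ⟨hi, hj, hall⟩ := (Df_char (gV matrix) i j (k+1)).mp hk1
        exact hc ((canExt_iff matrix i j k).mpr ⟨by omega, by omega, hall k (by omega)⟩)
      rw [grow, dif_neg hc]
      omega

lemma grow_eq (matrix : List (List Int)) (i j : Nat) :
    grow matrix i j 0 = Df (gV matrix) i j := by
  exact grow_eq_aux matrix i j (i+1) 0 (by omega) (Nat.zero_le _)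
lemma Lf_zero_of_ne (g : Nat → Nat → Int) (i j : Nat) (h : g i j ≠ 0) : Lf g i j = 0 := by
  cases j <;> simp [Lf, h]

lemma Uf_zero_of_ne (g : Nat → Nat → Int) (i j : Nat) (h : g i j ≠ 0) : Uf g i j = 0 := by
  cases i <;> simp [Uf, h]

lemma Df_zero_of_eq (g : Nat → Nat → Int) (i j : Nat) (h : g i j = 0) : Df g i j = 0 := by
  cases i <;> cases j <;> simp [Df, h]

lemma innerA_inv (g : Nat → Nat → Int) (i : Nat) :
    ∀ (c j : Nat) (prevLeft dpDiag len : Int) (pu pd : List Int),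
    0 ≤ len →
    (∀ j', j = j' + 1 → prevLeft = (Lf g i j' : Int)) →
    (∀ i' j', i = i' + 1 → j = j' + 1 → dpDiag = (Df g i' j' : Int)) →
    (∀ i', i = i' + 1 → pu = (List.range' j c).map (fun t => (Uf g i' t : Int))) →
    (∀ i', i = i' + 1 → pd = (List.range' j c).map (fun t => (Df g i' t : Int))) →
    innerA (decide (i = 0)) (decide (j = 0)) prevLeft dpDiag len
        ((List.range' j c).map (fun t => g i t)) pu pd =
      ((List.range' j c).map (fun t => (Lf g i t : Int)),
       (List.range' j c).map (fun t => (Uf g i t : Int)),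
       (List.range' j c).map (fun t => (Df g i t : Int)),
       (List.range' j c).foldl (fun l t => max l ((Df g i t : Int))) len) := by
  intro c
  induction c with
  | zero =>
    intro j prevLeft dpDiag len pu pd _ _ _ _ _
    simp [innerA]
  | succ c ih =>
    intro j prevLeft dpDiag len pu pd hlen hpl hdd hpu hpd
    rw [List.range'_succ]
    simp only [List.map_cons, List.foldl_cons]
    by_cases hz : g i j = 0
    · -- zero cell
      have hlv : (if decide (j = 0) = true then (1:Int) else prevLeft + 1) = (Lf g i j : Int) := by
        cases j with
        | zero => simp [Lf, hz]
        | succ j' =>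
          rw [hpl j' rfl]
          simp [Lf, hz]
      have huv : (if decide (i = 0) = true then (1:Int) else pu.headD 0 + 1) = (Uf g i j : Int) := by
        cases i with
        | zero => simp [Uf, hz]
        | succ i' =>
          rw [hpu i' rfl]
          simp [List.range'_succ, Uf, hz]
      simp only [innerA, if_pos hz]
      rw [hlv, huv]
      have hrec := ih (j+1) (Lf g i j : Int) (pd.headD 0) len pu.tail pd.tail hlen
        (by intro j' hj; cases hj; rfl)
        (by
          intro i' j' hi hj
          cases hj
          rw [hpd i' hi, List.range'_succ]
          simp)
        (by intro i' hi; rw [hpu i' hi, List.range'_succ]; simp)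
        (by intro i' hi; rw [hpd i' hi, List.range'_succ]; simp)
      have hfc : decide (j + 1 = 0) = false := by simp
      rw [hfc] at hrec
      rw [hrec]
      simp only [Df_zero_of_eq g i j hz]
      have hm : max len (0:Int) = len := by omega
      simp [hm]
    · -- nonzero cell
      have hdv : (if (decide (i = 0) || decide (j = 0)) = true then (1:Int)
            else min (min dpDiag prevLeft) (pu.headD 0) + 1) = (Df g i j : Int) := by
        cases i with
        | zero => simp [Df, hz]
        | succ i' =>
          cases j with
          | zero => simp [Df, hz]
          | succ j' =>
            rw [hdd i' j' rfl rfl, hpl j' rfl, hpu i' rfl]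
            simp only [List.range'_succ, List.map_cons, List.headD_cons]
            simp [Df, hz]
      simp only [innerA, if_neg hz]
      rw [hdv]
      have hlen' : 0 ≤ max len (Df g i j : Int) := le_trans hlen (le_max_left _ _)
      have hrec := ih (j+1) 0 (pd.headD 0) (max len (Df g i j : Int)) pu.tail pd.tail hlen'
        (by
          intro j' hj
          cases hj
          rw [Lf_zero_of_ne g i j hz]
          simp)
        (by
          intro i' j' hi hj
          cases hj
          rw [hpd i' hi, List.range'_succ]
          simp)
        (by intro i' hi; rw [hpu i' hi, List.range'_succ]; simp)
        (by intro i' hi; rw [hpd i' hi, List.range'_succ]; simp)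
      have hfc : decide (j + 1 = 0) = false := by simp
      rw [hfc] at hrec
      rw [hrec]
      simp [Lf_zero_of_ne g i j hz, Uf_zero_of_ne g i j hz]
lemma le_foldl_max (f : Nat → Int) : ∀ (l : List Nat) (b : Int),
    b ≤ l.foldl (fun x t => max x (f t)) b := by
  intro l
  induction l with
  | nil => intro b; exact le_rfl
  | cons a l ih =>
    intro b
    simp only [List.foldl_cons]
    exact le_trans (le_max_left b (f a)) (ih (max b (f a)))

lemma outerA_inv (g : Nat → Nat → Int) (n : Nat) :
    ∀ (r i : Nat) (len : Int) (pu pd : List Int),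
    0 ≤ len →
    (∀ i', i = i' + 1 → pu = (List.range' 0 n).map (fun t => (Uf g i' t : Int))) →
    (∀ i', i = i' + 1 → pd = (List.range' 0 n).map (fun t => (Df g i' t : Int))) →
    outerA (decide (i = 0)) pu pd len
        ((List.range' i r).map (fun a => (List.range' 0 n).map (fun t => g a t))) =
      (List.range' i r).foldl
        (fun l a => (List.range' 0 n).foldl (fun l t => max l ((Df g a t : Int))) l) len := by
  intro r
  induction r with
  | zero =>
    intro i len pu pd _ _ _
    simp [outerA]
  | succ r ih =>
    intro i len pu pd hlen hpu hpd
    rw [List.range'_succ]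
    simp only [List.map_cons, List.foldl_cons, outerA]
    have hinner := innerA_inv g i n 0 0 0 len pu pd hlen
      (by intro j' h; omega)
      (by intro i' j' _ h; omega)
      (by intro i' hi; exact hpu i' hi)
      (by intro i' hi; exact hpd i' hi)
    have hfc : decide ((0:Nat) = 0) = true := by simp
    rw [hfc] at hinner
    rw [hinner]
    have hrec := ih (i+1)
      ((List.range' 0 n).foldl (fun l t => max l ((Df g i t : Int))) len)
      ((List.range' 0 n).map (fun t => (Uf g i t : Int)))
      ((List.range' 0 n).map (fun t => (Df g i t : Int)))
      (le_trans hlen (le_foldl_max _ _ _))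
      (by intro i' h; cases h; rfl)
      (by intro i' h; cases h; rfl)
    have hfc2 : decide (i + 1 = 0) = false := by simp
    rw [hfc2] at hrec
    exact hrec
lemma row_take_eq (row : List Int) (n : Nat) (h : n ≤ row.length) :
    row.take n = (List.range' 0 n).map (fun t => row.getD t 0) := by
  apply List.ext_getElem
  · simp [List.length_range']
    omega
  · intro t h1 h2
    simp only [List.getElem_take, List.getElem_map, List.getElem_range']
    rw [List.getD_eq_getElem]
    · simp
    · simp at h1
      omega

lemma rows_eq (M : List (List Int)) (n : Nat) (h : ∀ row ∈ M, n ≤ row.length) :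
    M.map (fun row => row.take n)
      = (List.range' 0 M.length).map (fun a => (List.range' 0 n).map (fun t => gV M a t)) := by
  apply List.ext_getElem
  · simp [List.length_range']
  · intro a h1 h2
    have ha : a < M.length := by simpa using h1
    simp only [List.getElem_map, List.getElem_range', Nat.zero_add]
    rw [row_take_eq (M[a]'ha) n (h (M[a]'ha) (List.getElem_mem _))]
    apply List.map_congr_left
    intro t _
    unfold gV
    simp only [one_mul]
    rw [List.getD_eq_getElem M [] ha]

lemma if_gt_eq_max (b k : Nat) : (if k > b then k else b) = max b k := by
  rcases Nat.lt_or_ge b k with h | h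
  · simp [h, Nat.max_eq_right (Nat.le_of_lt h)]
  · have hn : ¬ (k > b) := by omega
    simp [hn, Nat.max_eq_left h]

lemma cast_foldl_max (f : Nat → Int) : ∀ (l : List Nat) (b : Nat) (fn : Nat → Nat),
    (∀ t, (fn t : Int) = f t) →
    ((l.foldl (fun x t => max x (fn t)) b : Nat) : Int)
      = l.foldl (fun x t => max x (f t)) (b : Int) := by
  intro l
  induction l with
  | nil => intro b fn _; rfl
  | cons a l ih =>
    intro b fn hfn
    simp only [List.foldl_cons]
    rw [ih (max b (fn a)) fn hfn]
    congr 1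
    push_cast
    rw [hfn a]

lemma cast_foldl_nested (F : Nat → Nat → Int) (inner : List Nat) :
    ∀ (l : List Nat) (b : Nat) (Fn : Nat → Nat → Nat),
    (∀ a t, (Fn a t : Int) = F a t) →
    ((l.foldl (fun x a => inner.foldl (fun x t => max x (Fn a t)) x) b : Nat) : Int)
      = l.foldl (fun x a => inner.foldl (fun x t => max x (F a t)) x) (b : Int) := by
  intro l
  induction l with
  | nil => intro b Fn _; rfl
  | cons a l ih =>
    intro b Fn hFn
    simp only [List.foldl_cons]
    rw [ih _ Fn hFn]
    congr 1
    exact cast_foldl_max (F a) inner b (Fn a) (hFn a)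
theorem max_square2_spec : Claim_equal_max_square2 := by
  intro matrix _ hpre
  unfold Spec_max_square2
  cases matrix with
  | nil => rfl
  | cons r0 rest =>
    by_cases hn : r0.length = 0
    · simp [max_square2, max_square2_alt, hn]
    · simp only [max_square2, max_square2_alt, if_neg hn]
      congr 1
      -- A side
      have hpre' : ∀ row ∈ (r0 :: rest), r0.length ≤ row.length := by
        intro row hr
        simpa using hpre row hr
      rw [rows_eq (r0 :: rest) r0.length hpre']
      have h0 : (true : Bool) = decide ((0:Nat) = 0) := by simp
      rw [h0,
        outerA_inv (gV (r0 :: rest)) r0.length (r0 :: rest).length 0 0 [] [] le_rfl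
          (by intro i' h; omega) (by intro i' h; omega)]
      -- B side
      simp only [List.range_eq_range', if_gt_eq_max]
      rw [cast_foldl_nested (fun a t => ((Df (gV (r0 :: rest)) a t : Nat) : Int))
        (List.range' 0 r0.length) (List.range' 0 (r0 :: rest).length) 0
        (fun i j => grow (r0 :: rest) i j 0) (by intro a t; simp [grow_eq])]
      simp
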